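-- pv_equiv track=rewrite | github.com/Po1ntu04/HarnessE | scripts/generate_mock_private_v3.py | expand_cues
-- ===== SOURCE A (Python) =====
-- def expand_cues(cues: list[str], needed: int) -> list[str]:
--     variants = [
--         "The main request is this: {cue}",
--         "Even with the extra context, {cue}",
--         "A user describes it this way: {cue}",
--         "The latest message says: {cue}",
--         "Please route the case where {cue_lc}",
--     ]
--     out = list(cues)
--     i = 0
--     while len(out) < needed:
--         cue = cues[i % len(cues)]
--         out.append(variants[(i // len(cues)) % len(variants)].format(cue=cue, cue_lc=cue[:1].lower() + cue[1:]))
--         i += 1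
--     return out
-- ===== SOURCE B (Python) =====
-- def expand_cues(cues: list[str], needed: int) -> list[str]:
--     variants = [
--         "The main request is this: {cue}",
--         "Even with the extra context, {cue}",
--         "A user describes it this way: {cue}",
--         "The latest message says: {cue}",
--         "Please route the case where {cue_lc}",
--     ]
--     out = list(cues)
--     extra = needed - len(out)
--     if extra <= 0:
--         return out
--     # The appended stream is periodic: one full period = every variant applied to every cue.
--     period = [
--         v.format(cue=c, cue_lc=c[:1].lower() + c[1:])
--         for v in variants
--         for c in cues
--     ]
--     full, rem = divmod(extra, len(period))  # ZeroDivisionError on empty cues, like A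
--     return out + period * full + period[:rem]
-- ===== Notes on version B (the rewrite author's own statement) =====
-- stated objective: alternative
-- what changed: Instead of A's per-item counter loop with i//n and i%n bookkeeping, B formats the full repeating period (all 5*len(cues) variant-cue combinations) exactly once, then tiles it with divmod and list multiplication, so formatting work is O(len(cues)) instead of O(needed).
import Mathlib
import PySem

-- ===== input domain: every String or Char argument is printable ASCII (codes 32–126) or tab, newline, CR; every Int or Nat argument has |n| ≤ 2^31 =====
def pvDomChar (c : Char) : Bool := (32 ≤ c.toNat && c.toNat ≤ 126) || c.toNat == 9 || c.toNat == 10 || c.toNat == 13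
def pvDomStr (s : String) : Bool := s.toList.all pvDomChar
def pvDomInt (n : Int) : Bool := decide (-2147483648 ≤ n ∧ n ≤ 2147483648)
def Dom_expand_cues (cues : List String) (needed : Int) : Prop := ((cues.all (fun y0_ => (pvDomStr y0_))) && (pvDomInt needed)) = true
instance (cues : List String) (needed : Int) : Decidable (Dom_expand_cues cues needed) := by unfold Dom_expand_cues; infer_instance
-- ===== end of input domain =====

-- B replaces A's per-item counter loop by precomputing the full repeating period (every
-- variant applied to every cue, 5·len(cues) strings, each formatted once) and tiling it
-- with divmod and list repetition (objective: alternative decomposition).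

-- Shared constant: the function-local `variants` list (identical literal in A and B).
def pvVariants : List String :=
  [ "The main request is this: {cue}"
  , "Even with the extra context, {cue}"
  , "A user describes it this way: {cue}"
  , "The latest message says: {cue}"
  , "Please route the case where {cue_lc}" ]

-- cue[:1].lower() + cue[1:] — exact: slice [:1] and [1:], lowercase of the (ASCII) first char.
def pvLowerFirst (s : String) : String :=
  String.mk (PySem.Chars.lower (PySem.List.slice s.toList none (some 1)) ++
             PySem.List.slice s.toList (some 1) none)

-- str.format for the two placeholders {cue} / {cue_lc}: scan the template left to right,
-- substituting each placeholder; exact for templates containing only these placeholders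
-- and no other braces (all five variants are of that shape).
def pvFormatAux : List Char → String → String → List Char
  | '{' :: 'c' :: 'u' :: 'e' :: '}' :: rest, cue, lc => cue.toList ++ pvFormatAux rest cue lc
  | '{' :: 'c' :: 'u' :: 'e' :: '_' :: 'l' :: 'c' :: '}' :: rest, cue, lc => lc.toList ++ pvFormatAux rest cue lc
  | c :: rest, cue, lc => c :: pvFormatAux rest cue lc
  | [], _, _ => []

def pvFormat (tpl cue lc : String) : String := String.mk (pvFormatAux tpl.toList cue lc)

-- ===== PORT A =====
-- The while-loop of A; i is Python's counter (always ≥ 0, so Nat `/` `%` coincide with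
-- Python's // and % here). Both list indexings are in range (i % n < n, (…)%5 < 5), so
-- getD is exact. The cues = [] branch is where Python raises ZeroDivisionError (i % len(cues));
-- it is excluded by Pre_expand_cues, the guard only makes the port total.
def expandLoopA (cues : List String) (needed : Int) (out : List String) (i : Nat) : List String :=
  if (out.length : Int) < needed then
    if cues ≠ [] then
      let cue := cues.getD (i % cues.length) ""
      expandLoopA cues needed
        (out ++ [pvFormat (pvVariants.getD ((i / cues.length) % pvVariants.length) "") cue (pvLowerFirst cue)])
        (i + 1)
    else out
  else out
termination_by (needed - out.length).toNat
decreasing_by simp; omega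

def expand_cues (cues : List String) (needed : Int) : List String :=
  expandLoopA cues needed cues 0

-- ===== PORT B =====
-- Transliteration of Source B: extra = needed - len(out); early return; `period` is the
-- comprehension over variants × cues; divmod(extra, len(period)) (Python // and %, divisor
-- ≠ 0 under Pre_ when this branch is reached); `period * full` is replicate-and-flatten,
-- `period[:rem]` with 0 ≤ rem is take.
def expand_cues_alt (cues : List String) (needed : Int) : List String :=
  let out := cues
  let extra : Int := needed - out.length
  if extra ≤ 0 then out
  else
    let period := pvVariants.flatMap (fun v =>
      cues.map (fun c => pvFormat v c (pvLowerFirst c)))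
    let full := PySem.Int.floordiv extra period.length
    let rem := PySem.Int.mod extra period.length
    out ++ (List.replicate full.toNat period).flatten ++ period.take rem.toNat

-- ===== PRECONDITION & SPEC =====
-- Pre_ excludes exactly the inputs (cues = [] with needed > 0) on which A raises
-- ZeroDivisionError (i % len(cues)); B raises the same error there (divmod by 0).
def Pre_expand_cues (cues : List String) (needed : Int) : Prop := cues ≠ [] ∨ needed ≤ 0
instance (cues : List String) (needed : Int) : Decidable (Pre_expand_cues cues needed) := by
  unfold Pre_expand_cues; infer_instance

def pvWitness_expand_cues : List String × Int := (["Ask about X"], 4)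

def Spec_expand_cues (cues : List String) (needed : Int) (out : List String) : Prop := out = expand_cues_alt cues needed
instance (cues : List String) (needed : Int) (out : List String) : Decidable (Spec_expand_cues cues needed out) := by unfold Spec_expand_cues; infer_instance

-- ===== CLAIM (what is proved, stated in full; the proofs are below) =====
def Claim_equal_expand_cues : Prop := ∀ (cues : List String) (needed : Int), Dom_expand_cues cues needed → Pre_expand_cues cues needed → Spec_expand_cues cues needed (expand_cues cues needed)

-- ===== LEMMAS AND PROOFS =====

-- The element A's loop appends at counter value i (n = cues.length).
def pvApp (cues : List String) (i : Nat) : String :=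
  let cue := cues.getD (i % cues.length) ""
  pvFormat (pvVariants.getD ((i / cues.length) % pvVariants.length) "") cue (pvLowerFirst cue)

lemma loopA_eq (cues : List String) (needed : Int) (hc : cues ≠ []) :
    ∀ (m : Nat) (out : List String) (i : Nat), (needed - (out.length : Int)).toNat = m →
      expandLoopA cues needed out i = out ++ (List.range m).map (fun j => pvApp cues (i + j)) := by
  intro m
  induction m with
  | zero =>
    intro out i h
    rw [expandLoopA]
    have : ¬ ((out.length : Int) < needed) := by omega
    simp [this]
  | succ m ih =>
    intro out i h
    have hlt : (out.length : Int) < needed := by omega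
    rw [expandLoopA, if_pos hlt, if_pos hc]
    rw [ih _ (i + 1) (by simp; omega)]
    have harg : (fun j => pvApp cues (i + 1 + j)) = (fun j => pvApp cues (i + (j + 1))) := by
      funext j; congr 1; omega
    simp only [List.range_succ_eq_map, List.map_cons, List.map_map, List.append_assoc,
      List.singleton_append, harg]
    rfl

lemma map_eq_range (f : String → String) (l : List String) :
    l.map f = (List.range l.length).map (fun j => f (l.getD j "")) := by
  apply List.ext_getElem
  · simp
  · intro k h1 h2
    simp at h2 ⊢
    rw [List.getElem?_eq_getElem (by simpa using h2)]
    rfl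

lemma chunk_eq (cues : List String) (hc : cues ≠ []) (v : Nat) :
    cues.map (fun c => pvFormat (pvVariants.getD (v % pvVariants.length) "") c (pvLowerFirst c))
      = (List.range cues.length).map (fun j => pvApp cues (v * cues.length + j)) := by
  rw [map_eq_range]
  apply List.map_congr_left
  intro j hj
  simp only [List.mem_range] at hj
  have hn : 0 < cues.length := List.length_pos_of_ne_nil hc
  unfold pvApp
  have h1 : (v * cues.length + j) / cues.length = v := by
    rw [Nat.mul_comm v, Nat.mul_add_div hn, Nat.div_eq_of_lt hj, Nat.add_zero]
  have h2 : (v * cues.length + j) % cues.length = j := by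
    rw [Nat.mul_comm v, Nat.mul_add_mod, Nat.mod_eq_of_lt hj]
  rw [h1, h2]

lemma flat_eq (cues : List String) (r : Nat) :
    (List.range r).flatMap (fun v => (List.range cues.length).map (fun j => pvApp cues (v * cues.length + j)))
      = (List.range (r * cues.length)).map (pvApp cues) := by
  induction r with
  | zero => simp
  | succ r ih =>
    rw [List.range_succ, List.flatMap_append, ih, Nat.succ_mul, List.range_add]
    simp [List.map_map, Function.comp_def]

-- B's period comprehension equals the first full period of A's stream.
lemma period_eq (cues : List String) (hc : cues ≠ []) :
    pvVariants.flatMap (fun v => cues.map (fun c => pvFormat v c (pvLowerFirst c)))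
      = (List.range (5 * cues.length)).map (pvApp cues) := by
  have h5 : (5 : Nat) * cues.length = 5 * cues.length := rfl
  have expand : pvVariants.flatMap (fun v => cues.map (fun c => pvFormat v c (pvLowerFirst c)))
      = (List.range 5).flatMap (fun v =>
          cues.map (fun c => pvFormat (pvVariants.getD (v % pvVariants.length) "") c (pvLowerFirst c))) := by
    simp [pvVariants, List.range_succ, List.flatMap]
  rw [expand]
  have := flat_eq cues 5
  rw [← this]
  exact List.flatMap_congr (fun v _ => chunk_eq cues hc v)

-- pvApp is periodic with period 5·n.
lemma pvApp_periodic (cues : List String) (hc : cues ≠ []) (j : Nat) :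
    pvApp cues (j + 5 * cues.length) = pvApp cues j := by
  have hn : 0 < cues.length := List.length_pos_of_ne_nil hc
  unfold pvApp
  have hcomm : j + 5 * cues.length = j + cues.length * 5 := by ring
  have h1 : (j + 5 * cues.length) % cues.length = j % cues.length := by
    rw [hcomm, Nat.add_mul_mod_self_left]
  have h2 : (j + 5 * cues.length) / cues.length = j / cues.length + 5 := by
    rw [hcomm, Nat.add_mul_div_left _ _ hn]
  have h3 : (j / cues.length + 5) % pvVariants.length = (j / cues.length) % pvVariants.length := by
    simp [pvVariants]
  rw [h1, h2, h3]

-- Tiling: the first k·p + r elements of a p-periodic stream are k copies of the period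
-- followed by its first r elements.
lemma tile_eq (f : Nat → String) (p : Nat) (hper : ∀ j, f (j + p) = f j) :
    ∀ (k r : Nat), (List.range (k * p + r)).map f
      = (List.replicate k ((List.range p).map f)).flatten ++ (List.range r).map f := by
  intro k
  induction k with
  | zero => simp
  | succ k ih =>
    intro r
    have hsplit : (k + 1) * p + r = p + (k * p + r) := by ring
    rw [hsplit, List.range_add, List.map_append, List.map_map]
    have : ((List.range (k * p + r)).map (f ∘ (p + ·))) = (List.range (k * p + r)).map f := by
      apply List.map_congr_left
      intro j _
      show f (p + j) = f j
      rw [Nat.add_comm, hper]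
    rw [this, ih r, List.replicate_succ, List.flatten_cons, List.append_assoc]

-- ===== VERDICT (by name: the statement is the Claim_ definition above) =====
theorem expand_cues_spec : Claim_equal_expand_cues := by
  intro cues needed _hdom hpre
  unfold Spec_expand_cues expand_cues expand_cues_alt
  by_cases hle : needed - (cues.length : Int) ≤ 0
  · rw [expandLoopA]
    have hnl : ¬ ((cues.length : Int) < needed) := by omega
    simp [hnl, hle]
  · push_neg at hle
    have hc : cues ≠ [] := by
      rcases hpre with h | h
      · exact h
      · exfalso; have : (0:Int) ≤ (cues.length : Int) := by positivity
        omega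
    have hn : 0 < cues.length := List.length_pos_of_ne_nil hc
    set n := cues.length with hndef
    set e := (needed - (n : Int)).toNat with he
    have hepos : 0 < e := by omega
    rw [loopA_eq cues needed hc e cues 0 rfl]
    have hnotle : ¬ (needed - (n : Int) ≤ 0) := by omega
    rw [period_eq cues hc]
    simp only [List.length_map, List.length_range, zero_add, ← hndef]
    rw [if_neg hnotle]
    have hcaste : needed - (n : Int) = ((e : Nat) : Int) := by omega
    rw [hcaste, PySem.Int.floordiv_natCast, PySem.Int.mod_natCast]
    simp only [Int.toNat_natCast]
    have hp : 0 < 5 * n := by omega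
    have hsplit : e = (e / (5 * n)) * (5 * n) + e % (5 * n) := by
      exact (Nat.div_add_mod' e (5 * n)).symm
    conv_lhs => rw [hsplit]
    rw [tile_eq (pvApp cues) (5 * n) (pvApp_periodic cues hc) (e / (5 * n)) (e % (5 * n))]
    rw [← List.map_take, List.take_range]
    have : min (e % (5 * n)) (5 * n) = e % (5 * n) := Nat.min_eq_left (Nat.le_of_lt (Nat.mod_lt _ hp))
    rw [this, List.append_assoc]
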